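-- pv_equiv track=rewrite | github.com/nogarder77/NogarderLotto | src/utils/helpers.py | validate_lotto_numbers
-- ===== SOURCE A (Python) =====
-- from typing import List, Dict, Any, Optional, Union, Tuple
--
-- def validate_lotto_numbers(numbers: List[int]) -> bool:
--     """
--     로또 번호 유효성 검증
--
--     Args:
--         numbers: 검증할 번호 리스트
--
--     Returns:
--         유효성 여부 (True/False)
--     """
--     # 6개의 번호인지 확인
--     if len(numbers) != 6:
--         return False
--
--     # 범위 검증 (1~45)
--     if not all(1 <= num <= 45 for num in numbers):
--         return False
--
--     # 중복 없는지 확인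
--     if len(set(numbers)) != 6:
--         return False
--
--     return True
-- ===== SOURCE B (Python) =====
-- def _valid_sorted(s):
--     """s is the six numbers in ascending order: endpoints give the range check,
--     adjacent strict increase gives uniqueness."""
--     if not (1 <= s[0] and s[-1] <= 45):
--         return False
--     return all(a < b for a, b in zip(s, s[1:]))
--
-- def validate_lotto_numbers(numbers):
--     """Sort-based validation."""
--     if len(numbers) != 6:
--         return False
--     return _valid_sorted(sorted(numbers))
-- ===== Notes on version B (the rewrite author's own statement) =====
-- stated objective: alternative
-- what changed: B sorts the list once and validates on the sorted order: the range check collapses to comparing the first sorted element with 1 and the last with 45, and uniqueness becomes a strict-increase check on adjacent sorted pairs, instead of A's all(...) scan plus len(set(...)) deduplication.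
import Mathlib
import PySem

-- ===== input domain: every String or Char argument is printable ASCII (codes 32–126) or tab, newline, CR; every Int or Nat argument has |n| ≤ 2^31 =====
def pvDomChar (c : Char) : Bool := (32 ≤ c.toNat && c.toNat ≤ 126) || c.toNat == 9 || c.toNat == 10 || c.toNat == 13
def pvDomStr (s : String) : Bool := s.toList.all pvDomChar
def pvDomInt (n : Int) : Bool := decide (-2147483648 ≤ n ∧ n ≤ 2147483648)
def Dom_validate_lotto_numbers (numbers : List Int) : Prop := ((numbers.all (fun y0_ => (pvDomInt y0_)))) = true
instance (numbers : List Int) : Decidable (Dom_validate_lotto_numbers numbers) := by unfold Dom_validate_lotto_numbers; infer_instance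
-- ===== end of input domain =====

-- B validates by sorting once and scanning the sorted order (endpoints give the range
-- check, adjacent strict increase gives uniqueness) instead of A's all(...) scan plus
-- len(set(...)) deduplication: alternative algorithm, same behaviour.


-- ===== PORT A =====
def validate_lotto_numbers (numbers : List Int) : Bool :=
  if numbers.length ≠ 6 then false
  else if ¬ (numbers.all (fun num => decide (1 ≤ num) && decide (num ≤ 45))) = true then false
  else if PySem.Set.len (PySem.Set.ofList numbers) ≠ 6 then false
  else true

-- ===== PORT B =====
-- helper _valid_sorted of Source B (the `_, _` arm is Python's IndexError on an empty s:
-- unreachable, _valid_sorted is only called with six elements)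
def pvValidSorted (s : List Int) : Bool :=
  match PySem.List.pyGet? s 0, PySem.List.pyGet? s (-1) with
  | some first, some last =>
    if ¬ (1 ≤ first ∧ last ≤ 45) then false
    else (s.zip (PySem.List.slice s (some 1) none)).all (fun p => decide (p.1 < p.2))
  | _, _ => false

def validate_lotto_numbers_alt (numbers : List Int) : Bool :=
  if numbers.length ≠ 6 then false
  else pvValidSorted (PySem.List.sorted numbers (fun x => x) false)

-- ===== PRECONDITION & SPEC =====
def Spec_validate_lotto_numbers (numbers : List Int) (out : Bool) : Prop := out = validate_lotto_numbers_alt numbers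
instance (numbers : List Int) (out : Bool) : Decidable (Spec_validate_lotto_numbers numbers out) := by unfold Spec_validate_lotto_numbers; infer_instance

-- ===== CLAIM (what is proved, stated in full; the proofs are below) =====
def Claim_equal_validate_lotto_numbers : Prop := ∀ (numbers : List Int), Dom_validate_lotto_numbers numbers → Spec_validate_lotto_numbers numbers (validate_lotto_numbers numbers)

-- ===== LEMMAS AND PROOFS =====

-- set(xs) keeps a subsequence of xs
theorem pvOfList_sublist (xs : List Int) : (PySem.Set.ofList xs).Sublist xs := by
  induction xs with
  | nil => simp [PySem.Set.ofList]
  | cons x t ih =>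
    rw [PySem.Set.ofList_cons]
    exact List.Sublist.cons₂ x (((PySem.Set.ofList t).filter_sublist).trans ih)

-- len(set(xs)) = len(xs) iff xs has no duplicates
theorem pvLenSet_iff (xs : List Int) : (PySem.Set.ofList xs).length = xs.length ↔ xs.Nodup := by
  constructor
  · intro h
    have := (pvOfList_sublist xs).eq_of_length h
    rw [← this]; exact PySem.Set.nodup_ofList xs
  · intro h; rw [PySem.Set.ofList_eq_self_of_nodup xs h]

-- in a ≤-sorted list every element is ≤ the last one
theorem pvLe_getLast (s : List Int) (hpw : s.Pairwise (· ≤ ·)) (hne : s ≠ []) :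
    ∀ x ∈ s, x ≤ s.getLast hne := by
  induction s with
  | nil => cases hne rfl
  | cons a t ih =>
    intro x hx
    cases t with
    | nil => simp at hx; simp [hx]
    | cons b t' =>
      rw [List.getLast_cons (List.cons_ne_nil b t')]
      rw [List.mem_cons] at hx
      rcases hx with rfl | hx
      · exact List.rel_of_pairwise_cons hpw (List.getLast_mem _)
      · exact ih hpw.of_cons (List.cons_ne_nil b t') x hx

-- adjacent strict increase on a ≤-sorted list is exactly pairwise strict increase
theorem pvAdj_iff (s : List Int) (hpw : s.Pairwise (· ≤ ·)) :
    ((s.zip s.tail).all (fun p => decide (p.1 < p.2)) = true) ↔ s.Pairwise (· < ·) := by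
  induction s with
  | nil => simp
  | cons a t ih =>
    cases t with
    | nil => simp
    | cons b t' =>
      simp only [List.tail_cons, List.zip_cons_cons, List.all_cons, Bool.and_eq_true,
        decide_eq_true_eq]
      have htail := ih hpw.of_cons
      simp only [List.tail_cons] at htail
      constructor
      · rintro ⟨hab, hrest⟩
        have hbt' : (b :: t').Pairwise (· < ·) := htail.mp hrest
        refine List.pairwise_cons.mpr ⟨?_, hbt'⟩
        intro z hz
        rw [List.mem_cons] at hz
        rcases hz with rfl | hz
        · exact hab
        · exact lt_of_lt_of_le hab (List.rel_of_pairwise_cons hpw.of_cons hz)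
      · intro h
        exact ⟨List.rel_of_pairwise_cons h (List.mem_cons_self), htail.mpr h.of_cons⟩

-- with pairwise ≤, pairwise < is exactly Nodup
theorem pvLt_iff_nodup (s : List Int) (hpw : s.Pairwise (· ≤ ·)) :
    s.Pairwise (· < ·) ↔ s.Nodup := by
  constructor
  · intro h; exact h.imp (fun hab => ne_of_lt hab)
  · intro h
    exact (hpw.and h).imp (fun hab => lt_of_le_of_ne hab.1 hab.2)

-- ===== VERDICT (by name: the statement is the Claim_ definition above) =====
theorem validate_lotto_numbers_spec : Claim_equal_validate_lotto_numbers := by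
  intro numbers _
  unfold Spec_validate_lotto_numbers validate_lotto_numbers validate_lotto_numbers_alt
  by_cases hlen : numbers.length = 6
  · have h6 : ¬ (numbers.length ≠ 6) := by omega
    rw [if_neg h6, if_neg h6]
    set s := PySem.List.sorted numbers (fun x => x) false with hsdef
    have hperm : s.Perm numbers := PySem.List.sorted_perm numbers (fun x => x) false
    have hpw : s.Pairwise (· ≤ ·) := by
      simpa using PySem.List.sorted_pairwise numbers (fun x => x)
    have hslen : s.length = 6 := by rw [hperm.length_eq, hlen]
    obtain ⟨m, t, hs⟩ : ∃ m t, s = m :: t := by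
      cases hcase : s with
      | nil => rw [hcase] at hslen; simp at hslen
      | cons a b => exact ⟨a, b, rfl⟩
    have hne : s ≠ [] := by rw [hs]; exact List.cons_ne_nil m t
    have hget0 : PySem.List.pyGet? s 0 = some m := by
      rw [hs]; exact PySem.List.pyGet?_zero_cons m t
    have hgetl : PySem.List.pyGet? s (-1) = some (s.getLast hne) := by
      rw [PySem.List.pyGet?_neg_one, List.getLast?_eq_some_getLast hne]
    unfold pvValidSorted
    rw [hget0, hgetl]
    have hslice : PySem.List.slice s (some 1) none = s.tail := PySem.List.slice_from_one s
    -- A's range check equals B's endpoint check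
    have hrange : (numbers.all (fun num => decide (1 ≤ num) && decide (num ≤ 45))) = true
        ↔ (1 ≤ m ∧ s.getLast hne ≤ 45) := by
      rw [List.all_eq_true]
      constructor
      · intro h
        have hm : m ∈ numbers := hperm.mem_iff.mp (by rw [hs]; exact List.mem_cons_self)
        have hl : s.getLast hne ∈ numbers := hperm.mem_iff.mp (List.getLast_mem hne)
        have h1 := h m hm
        have h2 := h (s.getLast hne) hl
        simp only [Bool.and_eq_true, decide_eq_true_eq] at h1 h2
        exact ⟨h1.1, h2.2⟩
      · rintro ⟨h1, h2⟩ x hx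
        have hxs : x ∈ s := hperm.mem_iff.mpr hx
        have hmx : m ≤ x := by
          rw [hs] at hxs hpw
          rw [List.mem_cons] at hxs
          rcases hxs with rfl | hxs
          · exact le_refl _
          · exact List.rel_of_pairwise_cons hpw hxs
        have hxl : x ≤ s.getLast hne := pvLe_getLast s hpw hne x hxs
        simp only [Bool.and_eq_true, decide_eq_true_eq]
        exact ⟨le_trans h1 hmx, le_trans hxl h2⟩
    by_cases hr : 1 ≤ m ∧ s.getLast hne ≤ 45
    · have hallT : (numbers.all (fun num => decide (1 ≤ num) && decide (num ≤ 45))) = true :=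
        hrange.mpr hr
      rw [if_neg (show ¬¬((numbers.all (fun num => decide (1 ≤ num) && decide (num ≤ 45))) = true) from not_not_intro hallT)]
      dsimp only
      rw [if_neg (not_not_intro hr)]
      -- A's set-length test equals B's adjacent strict-increase test
      have hlens : (PySem.Set.ofList numbers).length = 6 ↔ numbers.Nodup := by
        rw [← hlen]; exact pvLenSet_iff numbers
      have hadj : ((s.zip (PySem.List.slice s (some 1) none)).all
          (fun p => decide (p.1 < p.2)) = true) ↔ numbers.Nodup := by
        rw [hslice, pvAdj_iff s hpw, pvLt_iff_nodup s hpw, hperm.nodup_iff]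
      by_cases hnd : numbers.Nodup
      · rw [if_neg (show ¬(PySem.Set.len (PySem.Set.ofList numbers) ≠ 6) by
          simp only [PySem.Set.len, ne_eq, not_not]; exact_mod_cast hlens.mpr hnd)]
        exact (hadj.mpr hnd).symm
      · rw [if_pos (show (PySem.Set.len (PySem.Set.ofList numbers) ≠ 6) by
          simp only [PySem.Set.len, ne_eq]; intro hc; exact hnd (hlens.mp (by exact_mod_cast hc)))]
        cases hv : (s.zip (PySem.List.slice s (some 1) none)).all (fun p => decide (p.1 < p.2))
        · rfl
        · exact absurd (hadj.mp hv) hnd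
    · have hallF : ¬((numbers.all (fun num => decide (1 ≤ num) && decide (num ≤ 45))) = true) :=
        fun h => hr (hrange.mp h)
      rw [if_pos hallF]
      dsimp only
      rw [if_pos hr]
  · rw [if_pos hlen, if_pos hlen]
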